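-- pv_equiv track=rewrite | github.com/tasi788/python-studanty | 範例程式/Python 資料結構 × 演算法 刷題鍛鍊班 範例程式/ch01/刷題1.py | countZero
-- ===== SOURCE A (Python) =====
-- def	countZero(n):
--   count, max_count = 0, 0		# 初設為0
--   while n > 0:
--     d = n % 10				# 取得個位數字
--     if d == 0:					# 個位數字為0
--       count += 1				# 計數器加1
--       max_count = max(max_count, count)	# max_count紀錄目前最大
--     else:
--       count = 0				# 個位數字不為0則計數器歸零
--     n = n // 10				# 去除1位數字
--   return max_count			#max_count是答案
-- ===== SOURCE B (Python) =====
-- from itertools import groupby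
--
-- def countZero(n):
--     if n <= 0:
--         return 0
--     return max((len(list(g)) for k, g in groupby(str(n)) if k == '0'), default=0)
-- ===== Notes on version B (the rewrite author's own statement) =====
-- stated objective: idiomatic
-- what changed: Replaces the per-digit arithmetic extraction loop with a running counter by string conversion plus itertools.groupby: group the decimal string into runs of equal characters and take the maximum length among the zero-keyed runs (with an explicit guard for non-positive input).
import Mathlib
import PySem

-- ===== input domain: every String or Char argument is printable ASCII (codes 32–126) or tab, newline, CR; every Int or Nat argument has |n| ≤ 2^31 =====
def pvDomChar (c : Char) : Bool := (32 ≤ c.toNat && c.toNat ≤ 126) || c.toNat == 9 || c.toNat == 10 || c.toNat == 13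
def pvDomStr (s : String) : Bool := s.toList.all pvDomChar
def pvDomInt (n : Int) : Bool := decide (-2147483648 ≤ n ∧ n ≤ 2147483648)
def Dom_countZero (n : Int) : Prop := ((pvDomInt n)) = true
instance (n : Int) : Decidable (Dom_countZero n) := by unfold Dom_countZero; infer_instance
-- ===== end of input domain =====

-- B replaces A's per-digit %10-extraction loop with str(n) + groupby-style runs (idiomatic; same cost).


-- ===== PORT A =====
-- the while loop of A: state (count, max_count); n > 0 guard, d = n % 10, branch, n //= 10
def countZeroGo (n c mx : Int) : Int :=
  if h : 0 < n then
    let d := PySem.Int.mod n 10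
    if d = 0 then countZeroGo (PySem.Int.floordiv n 10) (c + 1) (max mx (c + 1))
    else countZeroGo (PySem.Int.floordiv n 10) 0 mx
  else mx
termination_by n.toNat
decreasing_by
  all_goals
    rw [PySem.Int.floordiv_eq_ediv_of_pos (by norm_num)]
    omega

def countZero (n : Int) : Int := countZeroGo n 0 0

-- ===== PORT B =====
-- itertools.groupby(s): the runs of equal chars, left to right, as (key, run length)
def grAux (k : Char) (m : Nat) : List Char → List (Char × Nat)
  | [] => [(k, m)]
  | c :: t => if c = k then grAux k (m + 1) t else (k, m) :: grAux c 1 t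

def pyGroups : List Char → List (Char × Nat)
  | [] => []
  | c :: t => grAux c 1 t

def countZero_alt (n : Int) : Int :=
  if n ≤ 0 then 0
  else
    let s := PySem.Int.toChars n
    let lens := (pyGroups s).filterMap (fun p => if p.1 = '0' then some ((p.2 : Int)) else none)
    PySem.List.maxD lens (fun x => x) 0   -- max(gen, default=0)

-- ===== PRECONDITION & SPEC =====
def Spec_countZero (n : Int) (out : Int) : Prop := out = countZero_alt n
instance (n : Int) (out : Int) : Decidable (Spec_countZero n out) := by unfold Spec_countZero; infer_instance

-- ===== CLAIM (what is proved, stated in full; the proofs are below) =====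
def Claim_equal_countZero : Prop := ∀ (n : Int), Dom_countZero n → Spec_countZero n (countZero n)

-- ===== LEMMAS AND PROOFS =====

-- zero-flags of the decimal digits of m, least significant first
def zl (m : Nat) : List Bool :=
  if h : m = 0 then [] else decide (m % 10 = 0) :: zl (m / 10)
termination_by m
decreasing_by omega

-- one step of the run-scan: state (current run, best)
def stepN (st : Nat × Nat) (z : Bool) : Nat × Nat :=
  if z then (st.1 + 1, max st.2 (st.1 + 1)) else (0, st.2)

-- greatest k such that a block of k consecutive `true`s occurs in l
def Mrun (l : List Bool) : Nat :=
  Nat.findGreatest (fun k => List.replicate k true <:+: l) l.length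

-- the digit characters of m, most significant first (shape of Nat.toDigits 10)
def digitsD (m : Nat) : List Char :=
  if h : m / 10 = 0 then [Nat.digitChar (m % 10)]
  else digitsD (m / 10) ++ [Nat.digitChar (m % 10)]
termination_by m
decreasing_by omega

lemma toDigitsCore_eq (fuel : Nat) : ∀ (m : Nat) (acc : List Char), m < fuel →
    Nat.toDigitsCore 10 fuel m acc = digitsD m ++ acc := by
  induction fuel with
  | zero => intro m acc h; omega
  | succ fuel ih =>
    intro m acc h
    rw [Nat.toDigitsCore, digitsD]
    by_cases h10 : m / 10 = 0
    · simp [h10]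
    · simp only [h10, if_false]
      rw [ih (m / 10) _ (by omega)]
      simp

lemma digitsD_ne_nil (m : Nat) : digitsD m ≠ [] := by
  rw [digitsD]; split <;> simp

lemma digitChar_eq_zero (d : Nat) (hd : d < 10) :
    (decide (Nat.digitChar d = '0')) = decide (d = 0) := by
  interval_cases d <;> decide

lemma flags_digitsD (m : Nat) (hm : 0 < m) :
    (digitsD m).map (fun c => decide (c = '0')) = (zl m).reverse := by
  rw [digitsD]
  by_cases h10 : m / 10 = 0
  · have hlt : m < 10 := by omega
    rw [dif_pos h10, zl]
    simp only [dif_neg (by omega : ¬ m = 0)]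
    rw [zl]; simp only [dif_pos h10]
    simp [digitChar_eq_zero (m % 10) (by omega)]
  · rw [dif_neg h10, zl]
    simp only [dif_neg (by omega : ¬ m = 0)]
    have ih := flags_digitsD (m / 10) (by omega)
    simp [ih, digitChar_eq_zero (m % 10) (by omega)]
termination_by m
decreasing_by omega

-- ---- Mrun facts ----

lemma rep_le_Mrun (c : Nat) (l : List Bool) : c ≤ Mrun (List.replicate c true ++ l) := by
  apply Nat.le_findGreatest (by simp)
  exact (List.prefix_append _ _).isInfix

lemma Mrun_spec {l : List Bool} (h0 : Mrun l ≠ 0) :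
    List.replicate (Mrun l) true <:+: l := by
  have h := (Nat.findGreatest_eq_iff (P := fun k => List.replicate k true <:+: l)
    (k := l.length) (m := Mrun l)).1 rfl
  exact h.2.1 h0

lemma Mrun_mono {l l' : List Bool} (h : ∀ k, List.replicate k true <:+: l → List.replicate k true <:+: l') :
    Mrun l ≤ Mrun l' := by
  by_cases h0 : Mrun l = 0
  · omega
  · have h' := h _ (Mrun_spec h0)
    exact Nat.le_findGreatest (le_trans (by simp) h'.length_le) h'

lemma rep_prefix_bound (c : Nat) : ∀ (j : Nat) (t : List Bool),
    List.replicate j true <+: List.replicate c true ++ false :: t → j ≤ c := by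
  induction c with
  | zero =>
    intro j t h
    cases j with
    | zero => omega
    | succ j' =>
      rw [List.replicate_succ] at h
      simp only [List.replicate, List.nil_append] at h
      rw [List.cons_prefix_cons] at h
      exact absurd h.1 (by decide)
  | succ c ih =>
    intro j t h
    cases j with
    | zero => omega
    | succ j' =>
      rw [List.replicate_succ, List.replicate_succ, List.cons_append, List.cons_prefix_cons] at h
      have := ih j' t h.2
      omega

lemma rep_infix_split (c : Nat) : ∀ (k : Nat) (t : List Bool),
    List.replicate k true <:+: List.replicate c true ++ false :: t →
    k ≤ c ∨ List.replicate k true <:+: t := by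
  induction c with
  | zero =>
    intro k t h
    simp only [List.replicate, List.nil_append] at h
    rcases List.infix_cons_iff.1 h with hp | hi
    · exact Or.inl (rep_prefix_bound 0 k t (by simpa using hp))
    · exact Or.inr hi
  | succ c ih =>
    intro k t h
    rw [List.replicate_succ, List.cons_append] at h
    rcases List.infix_cons_iff.1 h with hp | hi
    · have := rep_prefix_bound (c + 1) k t (by
        rw [List.replicate_succ, List.cons_append]; exact hp)
      exact Or.inl this
    · rcases ih k t hi with h1 | h2
      · exact Or.inl (by omega)
      · exact Or.inr h2

lemma Mrun_sep (c : Nat) (t : List Bool) :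
    Mrun t ≤ Mrun (List.replicate c true ++ false :: t) ∧
    Mrun (List.replicate c true ++ false :: t) ≤ max c (Mrun t) := by
  constructor
  · apply Mrun_mono
    intro k hk
    exact hk.trans ((List.suffix_cons false t).trans (List.suffix_append _ _)).isInfix
  · set g := Mrun (List.replicate c true ++ false :: t) with hg
    by_cases h0 : g = 0
    · omega
    · have hspec : List.replicate g true <:+: List.replicate c true ++ false :: t :=
        Mrun_spec h0
      rcases rep_infix_split c g t hspec with h1 | h2
      · omega
      · have : g ≤ Mrun t :=
          Nat.le_findGreatest (le_trans (by simp) h2.length_le) h2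
        omega

lemma foldl_stepN_spec (l : List Bool) : ∀ (c b : Nat), c ≤ b →
    (List.foldl stepN (c, b) l).2 = max b (Mrun (List.replicate c true ++ l)) := by
  induction l with
  | nil =>
    intro c b hcb
    have h1 : c ≤ Mrun (List.replicate c true) := by
      have := rep_le_Mrun c []
      simpa using this
    have h2 : Mrun (List.replicate c true) ≤ c := by
      simp only [Mrun, List.length_replicate]
      exact Nat.findGreatest_le c
    simp only [List.foldl_nil, List.append_nil]
    omega
  | cons z t ih =>
    intro c b hcb
    cases z with
    | true =>
      have hrw : List.replicate c true ++ true :: t = List.replicate (c + 1) true ++ t := by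
        rw [List.replicate_succ', List.append_assoc]; rfl
      rw [List.foldl_cons]
      have : stepN (c, b) true = (c + 1, max b (c + 1)) := by simp [stepN]
      rw [this, ih (c + 1) (max b (c + 1)) (by omega), hrw]
      have := rep_le_Mrun (c + 1) t
      omega
    | false =>
      rw [List.foldl_cons]
      have : stepN (c, b) false = (0, b) := by simp [stepN]
      rw [this, ih 0 b (by omega)]
      have := Mrun_sep c t
      simp only [List.replicate, List.nil_append] at *
      omega

lemma Mrun_reverse (l : List Bool) : Mrun l.reverse = Mrun l := by
  have h : ∀ k, List.replicate k true <:+: l.reverse ↔ List.replicate k true <:+: l := by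
    intro k
    conv_lhs => rw [show List.replicate k true = (List.replicate k true).reverse from (List.reverse_replicate).symm]
    exact List.reverse_infix
  apply le_antisymm
  · exact Mrun_mono (fun k hk => (h k).1 hk)
  · exact Mrun_mono (fun k hk => (h k).2 hk)

lemma foldl_stepN_base (l : List Bool) :
    (List.foldl stepN (0, 0) l).2 = Mrun l := by
  have := foldl_stepN_spec l 0 0 (le_refl 0)
  simpa using this

-- ---- A side ----

lemma countZeroGo_eq (N : Nat) : ∀ (n : Int) (c b : Nat), n.toNat = N →
    countZeroGo n (c : Int) (b : Int) = (((List.foldl stepN (c, b) (zl N)).2 : Nat) : Int) := by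
  induction N using Nat.strong_induction_on with
  | _ N ih =>
    intro n c b hN
    rw [countZeroGo]
    by_cases hpos : 0 < n
    · have hNpos : 0 < N := by omega
      have hcast : n = ((N : Nat) : Int) := by omega
      rw [zl]; simp only [dif_neg (by omega : ¬ N = 0)]
      simp only [dif_pos hpos]
      have hmod : PySem.Int.mod n 10 = ((N % 10 : Nat) : Int) := by
        rw [hcast]; exact_mod_cast PySem.Int.mod_natCast N 10
      have hdiv : PySem.Int.floordiv n 10 = ((N / 10 : Nat) : Int) := by
        rw [hcast, PySem.Int.floordiv_eq_ediv_of_pos (by norm_num)]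
        exact (Int.natCast_ediv N 10).symm
      by_cases hz : N % 10 = 0
      · rw [if_pos (by rw [hmod, hz]; simp)]
        rw [hdiv]
        have h1 : ((c : Int) + 1) = ((c + 1 : Nat) : Int) := by push_cast; ring
        rw [h1, ← Nat.cast_max, ih (N / 10) (by omega) _ _ _ (by omega)]
        simp [stepN, hz]
      · rw [if_neg (by rw [hmod]; exact fun h => hz (by exact_mod_cast h))]
        rw [hdiv]
        have h0 : (0 : Int) = ((0 : Nat) : Int) := rfl
        rw [h0, ih (N / 10) (by omega) _ _ _ (by omega)]
        simp [stepN, hz]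
    · have : N = 0 := by omega
      subst this
      simp only [dif_neg hpos]
      rw [zl]; simp

-- ---- B side ----

-- the best-so-far accumulation over the (key, run length) groups
def W (b : Nat) (gs : List (Char × Nat)) : Nat :=
  gs.foldl (fun acc p => if p.1 = '0' then max acc p.2 else acc) b

lemma grAux_W (t : List Char) : ∀ (k : Char) (m b : Nat),
    W b (grAux k m t) =
      (List.foldl stepN (if k = '0' then (m, max b m) else (0, b))
        (t.map (fun c => decide (c = '0')))).2 := by
  induction t with
  | nil =>
    intro k m b
    by_cases hk : k = '0' <;> simp [grAux, W, hk]
  | cons c t ih =>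
    intro k m b
    rw [grAux]
    by_cases hck : c = k
    · rw [if_pos hck]
      subst hck
      rw [ih c (m + 1) b]
      by_cases hk : c = '0'
      · have hmax : max (max b m) (m + 1) = max b (m + 1) := by omega
        simp [hk, stepN, hmax]
      · simp [hk, stepN]
    · rw [if_neg hck]
      by_cases hk : k = '0'
      · have hW : W b ((k, m) :: grAux c 1 t) = W (max b m) (grAux c 1 t) := by
          simp [W, hk]
        rw [hW, ih c 1 (max b m)]
        by_cases hc0 : c = '0'
        · exact absurd (hc0.trans hk.symm) hck
        · simp [hk, hc0, stepN]
      · have hW : W b ((k, m) :: grAux c 1 t) = W b (grAux c 1 t) := by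
          simp [W, hk]
        rw [hW, ih c 1 b]
        by_cases hc0 : c = '0'
        · simp [hk, hc0, stepN]
        · simp [hk, hc0, stepN]

def lensOf (gs : List (Char × Nat)) : List Int :=
  gs.filterMap (fun p => if p.1 = '0' then some ((p.2 : Int)) else none)

lemma foldl_max_lensOf (gs : List (Char × Nat)) : ∀ (b : Nat),
    List.foldl max ((b : Nat) : Int) (lensOf gs) = ((W b gs : Nat) : Int) := by
  induction gs with
  | nil => intro b; simp [lensOf, W]
  | cons p t ih =>
    intro b
    obtain ⟨k, m⟩ := p
    by_cases hk : k = '0'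
    · have h1 : lensOf ((k, m) :: t) = (m : Int) :: lensOf t := by
        simp [lensOf, hk]
      have h2 : W b ((k, m) :: t) = W (max b m) t := by simp [W, hk]
      rw [h1, h2, List.foldl_cons, ← ih (max b m)]
      congr 1
      push_cast; omega
    · have h1 : lensOf ((k, m) :: t) = lensOf t := by simp [lensOf, hk]
      have h2 : W b ((k, m) :: t) = W b t := by simp [W, hk]
      rw [h1, h2, ih b]

lemma max?_cons (x : Int) (t : List Int) :
    PySem.List.max? (x :: t) (fun y => y) = some (List.foldl max x t) := by
  simp only [PySem.List.max?, List.foldl_cons]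
  show List.foldl _ (some x) t = _
  induction t generalizing x with
  | nil => rfl
  | cons y t ih =>
    simp only [List.foldl_cons]
    show List.foldl _ (if x < y then some y else some x) t = some (List.foldl max (max x y) t)
    by_cases h : x < y
    · rw [if_pos h, ih y]
      have hm : max x y = y := by omega
      rw [hm]
    · rw [if_neg h, ih x]
      have hm : max x y = x := by omega
      rw [hm]

lemma maxD_eq_foldl (l : List Int) (hpos : ∀ x ∈ l, 0 ≤ x) :
    PySem.List.maxD l (fun x => x) 0 = List.foldl max 0 l := by
  cases l with
  | nil => simp [PySem.List.maxD, PySem.List.max?]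
  | cons x t =>
    have hx : max (0 : Int) x = x := by
      have := hpos x (by simp); omega
    rw [PySem.List.maxD, max?_cons, List.foldl_cons, hx]
    rfl

lemma lensOf_nonneg (gs : List (Char × Nat)) : ∀ x ∈ lensOf gs, 0 ≤ x := by
  intro x hx
  simp only [lensOf, List.mem_filterMap] at hx
  obtain ⟨p, _, hp⟩ := hx
  by_cases h : p.1 = '0'
  · simp [h] at hp; omega
  · simp [h] at hp

lemma countZero_alt_pos (n : Int) (hn : 0 < n) :
    countZero_alt n = ((Mrun (((PySem.Int.toChars n).map (fun c => decide (c = '0'))).reverse) : Nat) : Int) := by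
  rw [countZero_alt, if_neg (by omega)]
  rw [Mrun_reverse]
  have hne : PySem.Int.toChars n ≠ [] := by
    rw [PySem.Int.toChars, if_neg (by omega)]
    rw [Nat.toDigits, toDigitsCore_eq _ _ _ (by omega)]
    simp [digitsD_ne_nil]
  obtain ⟨c, t, hct⟩ := List.exists_cons_of_ne_nil hne
  rw [hct]
  show PySem.List.maxD (lensOf (pyGroups (c :: t))) (fun x => x) 0 = _
  rw [maxD_eq_foldl _ (lensOf_nonneg _)]
  have h0 : ((0 : Nat) : Int) = (0 : Int) := rfl
  rw [← h0, foldl_max_lensOf]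
  rw [show pyGroups (c :: t) = grAux c 1 t from rfl, grAux_W]
  rw [← foldl_stepN_base ((c :: t).map (fun c => decide (c = '0')))]
  congr 2
  by_cases hc : c = '0' <;> simp [hc, stepN]

-- ===== VERDICT (by name: the statement is the Claim_ definition above) =====
theorem countZero_spec : Claim_equal_countZero := by
  unfold Claim_equal_countZero Spec_countZero
  intro n _
  by_cases hn : 0 < n
  · rw [countZero_alt_pos n hn]
    have hflags : (PySem.Int.toChars n).map (fun c => decide (c = '0')) = (zl n.toNat).reverse := by
      rw [PySem.Int.toChars, if_neg (by omega)]
      rw [Nat.toDigits, toDigitsCore_eq _ _ _ (by omega)]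
      rw [List.append_nil]
      exact flags_digitsD n.toNat (by omega)
    rw [hflags, List.reverse_reverse]
    have hA := countZeroGo_eq n.toNat n 0 0 rfl
    simp only [Nat.cast_zero] at hA
    rw [countZero, hA, foldl_stepN_base]
  · rw [countZero, countZeroGo, dif_neg hn, countZero_alt, if_pos (by omega)]
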